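-- pv_equiv track=rewrite | github.com/UE-alicja-pegiel/drzewo_decyzyjne | moduly/obliczenia.py | liczba_wystapien_decyzyjnych
-- ===== SOURCE A (Python) =====
-- def bez_zer(slownik):
--     nowy = {}
--     for element in slownik:
--         nowy[element] = {i: {j: slownik[element][i][j] for j in slownik[element][i] if slownik[element][i][j] != 0}
--                          for i in slownik[element]}
--     return nowy
--
-- def liczba_wystapien_decyzyjnych(tab: list) -> dict:
--     """
--     :param tab: lista składająca się z atrybutów (a1, a2, ..., d), gdzie d to atrybut decyzyjny
--     :return: słownik wystąpień wartości atrybutów decyzyjnych dla poszczególnych atrybutów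
--     """
--     slownik = {}
--
--     for idx, element in enumerate(tab[:len(tab)-1]):
--         elementy = {i: {j: 0 for j in tab[-1]} for i in set(element)}
--         slownik["a"+f"{idx+1}"] = elementy
--
--     for d in set(tab[-1]):
--         for i, element in enumerate(tab[:len(tab)-1]):
--             for idx, el in enumerate(tab[-1]):
--                 if el == d:
--                     slownik["a" + f"{i + 1}"][element[idx]][d] += 1
--     return bez_zer(slownik)
-- ===== SOURCE B (Python) =====
-- def liczba_wystapien_decyzyjnych(tab: list) -> dict:
--     """
--     :param tab: lista składająca się z atrybutów (a1, a2, ..., d), gdzie d to atrybut decyzyjny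
--     :return: słownik wystąpień wartości atrybutów decyzyjnych dla poszczególnych atrybutów
--     """
--     dec = tab[-1]
--     wynik = {}
--     for idx, kolumna in enumerate(tab[:-1]):
--         pary = {}
--         for i, d in enumerate(dec):
--             pary[(kolumna[i], d)] = pary.get((kolumna[i], d), 0) + 1
--         wynik[f"a{idx + 1}"] = {v: {d: pary[(v, d)] for d in dict.fromkeys(dec) if (v, d) in pary}
--                                 for v in dict.fromkeys(kolumna)}
--     return wynik
-- ===== Notes on version B (the rewrite author's own statement) =====
-- stated objective: simpler
-- what changed: A builds a zero-filled grid of all (attribute-value, decision-value) pairs, fills it with a triple loop over set(tab[-1]) x columns x rows, then rewrites the whole structure dropping zero entries (bez_zer); B makes one pass over the rows of each column into a flat pair counter and assembles the nested dict directly from it, never creating or pruning zero entries; like A, B indexes the column by row position, so it raises on ragged tables.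
import Mathlib
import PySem

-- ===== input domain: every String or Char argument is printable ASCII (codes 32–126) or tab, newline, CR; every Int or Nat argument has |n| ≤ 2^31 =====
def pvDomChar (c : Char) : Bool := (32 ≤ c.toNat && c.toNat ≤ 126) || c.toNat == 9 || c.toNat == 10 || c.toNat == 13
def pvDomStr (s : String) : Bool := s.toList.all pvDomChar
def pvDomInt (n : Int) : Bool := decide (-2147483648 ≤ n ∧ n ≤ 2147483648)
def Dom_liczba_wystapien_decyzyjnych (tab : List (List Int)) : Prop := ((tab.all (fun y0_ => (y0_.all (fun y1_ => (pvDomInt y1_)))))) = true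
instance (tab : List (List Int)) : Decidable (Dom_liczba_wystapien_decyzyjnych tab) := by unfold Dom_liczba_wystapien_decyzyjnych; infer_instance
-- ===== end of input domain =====

-- B replaces A's three phases (zero-filled grid init, triple counting loop, zero-pruning rewrite
-- bez_zer) by one counting pass over the rows of each column into a flat pair-counter plus a direct
-- assembly of the result; objective: simpler, and the counting no longer repeats per distinct
-- decision value.

-- ===== PORT A =====
-- helper bez_zer of A: rebuilds the nested dict dropping zero-valued innermost entries
-- (Python indexes slownik[element][i][j] on keys that are always present; getD is exact there)
def bez_zer (slownik : PySem.Dict String (PySem.Dict Int (PySem.Dict Int Int))) :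
    PySem.Dict String (PySem.Dict Int (PySem.Dict Int Int)) :=
  slownik.keys.foldl (fun nowy element =>
    let outer := slownik.getD element PySem.Dict.empty
    nowy.insert element
      (outer.keys.foldl (fun acc i =>
        let inner := outer.getD i PySem.Dict.empty
        acc.insert i
          (inner.keys.foldl (fun acc2 j =>
            if inner.getD j 0 != 0 then acc2.insert j (inner.getD j 0) else acc2)
            PySem.Dict.empty))
        PySem.Dict.empty))
    PySem.Dict.empty

def liczba_wystapien_decyzyjnych (tab : List (List Int)) : List (String × List (Int × List (Int × Int))) :=
  -- tab[-1] (IndexError on []: excluded by Pre_) and tab[:len(tab)-1]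
  let dec := (PySem.List.pyGet? tab (-1)).getD []
  let cols := PySem.List.slice tab none (some ((tab.length : Int) - 1))
  -- first loop: zero-filled grid  {i: {j: 0 for j in tab[-1]} for i in set(element)}
  let slownik : PySem.Dict String (PySem.Dict Int (PySem.Dict Int Int)) :=
    (PySem.List.enumerate cols).foldl (fun sl p =>
      sl.insert ("a" ++ PySem.Int.toStr (p.1 + 1))
        ((PySem.Set.ofList p.2).foldl (fun e i =>
            e.insert i (dec.foldl (fun dd j => dd.insert j 0) PySem.Dict.empty))
          PySem.Dict.empty)) PySem.Dict.empty
  -- second loop: slownik["a"+str(i+1)][element[idx]][d] += 1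
  -- (element[idx] raises IndexError when a column is shorter than tab[-1]: excluded by Pre_;
  --  the dict lookups hit existing keys there, so getD is exact)
  let slownik2 :=
    (PySem.Set.ofList dec).foldl (fun sl d =>
      (PySem.List.enumerate cols).foldl (fun sl q =>
        (PySem.List.enumerate dec).foldl (fun sl r =>
          if r.2 == d then
            let k := "a" ++ PySem.Int.toStr (q.1 + 1)
            let outer := sl.getD k PySem.Dict.empty
            let v := PySem.List.pyGetD q.2 r.1 0
            let inner := outer.getD v PySem.Dict.empty
            sl.insert k (outer.insert v (inner.insert d (inner.getD d 0 + 1)))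
          else sl) sl) sl) slownik
  (bez_zer slownik2).items.map (fun p => (p.1, p.2.items.map (fun q => (q.1, q.2.items))))

-- ===== PORT B =====
def liczba_wystapien_decyzyjnych_alt (tab : List (List Int)) : List (String × List (Int × List (Int × Int))) :=
  let dec := (PySem.List.pyGet? tab (-1)).getD []   -- tab[-1] (IndexError on []: excluded by Pre_)
  let cols := PySem.List.slice tab none (some (-1)) -- tab[:-1]
  let wynik : PySem.Dict String (PySem.Dict Int (PySem.Dict Int Int)) :=
    (PySem.List.enumerate cols).foldl (fun w p =>
      -- one counting pass: for i, d in enumerate(dec): pary[(kolumna[i], d)] += 1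
      -- (kolumna[i] raises IndexError when the column is shorter: excluded by Pre_)
      let pary : PySem.Dict (Int × Int) Int :=
        (PySem.List.enumerate dec).foldl (fun pr r =>
          pr.insert (PySem.List.pyGetD p.2 r.1 0, r.2)
            (pr.getD (PySem.List.pyGetD p.2 r.1 0, r.2) 0 + 1)) PySem.Dict.empty
      w.insert ("a" ++ PySem.Int.toStr (p.1 + 1))
        ((PySem.List.dedup p.2).foldl (fun m v =>          -- dict.fromkeys(kolumna)
            m.insert v
              ((PySem.List.dedup dec).foldl (fun dd d =>   -- dict.fromkeys(dec)
                  if pary.contains (v, d) then dd.insert d (pary.getD (v, d) 0) else dd)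
                PySem.Dict.empty))
          PySem.Dict.empty))
      PySem.Dict.empty
  wynik.items.map (fun p => (p.1, p.2.items.map (fun q => (q.1, q.2.items))))

-- ===== PRECONDITION & SPEC =====
-- Pre_ = exactly the inputs where A returns: tab nonempty (tab[-1] IndexError otherwise) and no
-- attribute column shorter than the decision column tab[-1] (element[idx] IndexError otherwise;
-- B raises there too, at kolumna[i]).
def Pre_liczba_wystapien_decyzyjnych (tab : List (List Int)) : Prop :=
  tab ≠ [] ∧ ∀ col ∈ tab.dropLast, ((tab.getLast?.getD []).length : Int) ≤ (col.length : Int)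
instance (tab : List (List Int)) : Decidable (Pre_liczba_wystapien_decyzyjnych tab) := by
  unfold Pre_liczba_wystapien_decyzyjnych; infer_instance

def pvWitness_liczba_wystapien_decyzyjnych : List (List Int) := [[1, 1, 2], [0, 1, 1]]

def Spec_liczba_wystapien_decyzyjnych (tab : List (List Int)) (out : List (String × List (Int × List (Int × Int)))) : Prop := out = liczba_wystapien_decyzyjnych_alt tab
instance (tab : List (List Int)) (out : List (String × List (Int × List (Int × Int)))) : Decidable (Spec_liczba_wystapien_decyzyjnych tab out) := by unfold Spec_liczba_wystapien_decyzyjnych; infer_instance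

-- ===== CLAIM (what is proved, stated in full; the proofs are below) =====
def Claim_equal_liczba_wystapien_decyzyjnych : Prop := ∀ (tab : List (List Int)), Dom_liczba_wystapien_decyzyjnych tab → Pre_liczba_wystapien_decyzyjnych tab → Spec_liczba_wystapien_decyzyjnych tab (liczba_wystapien_decyzyjnych tab)

-- ===== LEMMAS AND PROOFS =====

-- digitChar injective below 10
theorem pvDigitChar_inj : ∀ x < 10, ∀ y < 10, Nat.digitChar x = Nat.digitChar y → x = y := by decide

theorem pvToDigits_inj (n : Nat) : ∀ m, Nat.toDigits 10 n = Nat.toDigits 10 m → n = m := by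
  induction n using Nat.strong_induction_on with
  | _ n ih =>
    intro m h
    rw [Nat.toDigits_eq_if (by norm_num), Nat.toDigits_eq_if (b := 10) (n := m) (by norm_num)] at h
    by_cases hn : n < 10 <;> by_cases hm : m < 10
    · rw [if_pos hn, if_pos hm] at h
      simp only [List.cons.injEq, and_true] at h
      exact pvDigitChar_inj n hn m hm h
    · rw [if_pos hn, if_neg hm] at h
      have := @Nat.length_toDigits_pos 10 (m / 10)
      have hl := congrArg List.length h
      simp only [List.length_append, List.length_cons, List.length_nil] at hl; omega
    · rw [if_neg hn, if_pos hm] at h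
      have := @Nat.length_toDigits_pos 10 (n / 10)
      have hl := congrArg List.length h
      simp only [List.length_append, List.length_cons, List.length_nil] at hl; omega
    · rw [if_neg hn, if_neg hm] at h
      have hlen : (Nat.toDigits 10 (n / 10)).length = (Nat.toDigits 10 (m / 10)).length := by
        have hl := congrArg List.length h; simp only [List.length_append, List.length_cons, List.length_nil] at hl; omega
      obtain ⟨h1, h2⟩ := List.append_inj h hlen
      have e1 : n / 10 = m / 10 := ih (n / 10) (Nat.div_lt_self (by omega) (by norm_num)) _ h1
      have e2 : n % 10 = m % 10 := by
        have hd := pvDigitChar_inj (n % 10) (Nat.mod_lt _ (by norm_num)) (m % 10) (Nat.mod_lt _ (by norm_num))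
        exact hd (by simpa using h2)
      omega

def pvKey (i : Int) : String := "a" ++ PySem.Int.toStr (i + 1)

theorem pvKey_inj {i j : Int} (hi : 0 ≤ i) (hj : 0 ≤ j) (h : pvKey i = pvKey j) : i = j := by
  unfold pvKey at h
  have h2 : (PySem.Int.toStr (i + 1)).toList = (PySem.Int.toStr (j + 1)).toList := by
    have := congrArg String.toList h
    simpa [String.toList_append] using this
  rw [PySem.Int.toList_toStr, PySem.Int.toList_toStr] at h2
  unfold PySem.Int.toChars at h2
  rw [if_neg (by omega), if_neg (by omega)] at h2
  have := pvToDigits_inj _ _ h2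
  omega

-- proof-side views of the nested dicts both programs build
def pvH (dec : List Int) (f : Int × List Int → Int → Int → Int) (p : Int × List Int) (v : Int) :
    PySem.Dict Int Int :=
  PySem.Dict.mk ((PySem.Set.ofList dec).map (fun d => (d, f p v d)))

def pvG (dec : List Int) (f : Int × List Int → Int → Int → Int) (p : Int × List Int) :
    PySem.Dict Int (PySem.Dict Int Int) :=
  PySem.Dict.mk ((PySem.Set.ofList p.2).map (fun v => (v, pvH dec f p v)))

def pvTable (dec : List Int) (ix : List (Int × List Int)) (f : Int × List Int → Int → Int → Int) :
    PySem.Dict String (PySem.Dict Int (PySem.Dict Int Int)) :=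
  PySem.Dict.mk (ix.map (fun p => (pvKey p.1, pvG dec f p)))

def pvGood (ix : List (Int × List Int)) : Prop :=
  (ix.map (·.1)).Nodup ∧ ∀ p ∈ ix, 0 ≤ p.1

theorem pvKeys_nodup {ix : List (Int × List Int)} (hg : pvGood ix) :
    (ix.map (fun p => pvKey p.1)).Nodup := by
  have : ix.map (fun p => pvKey p.1) = (ix.map (·.1)).map pvKey := by simp [List.map_map]
  rw [this]
  refine List.Nodup.map_on ?_ hg.1
  intro x hx y hy h
  simp only [List.mem_map] at hx hy
  obtain ⟨p, hp, rfl⟩ := hx; obtain ⟨q, hq, rfl⟩ := hy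
  exact pvKey_inj (hg.2 p hp) (hg.2 q hq) h

theorem pvH_getD {dec : List Int} {f} {p : Int × List Int} {v d : Int}
    (hd : d ∈ PySem.Set.ofList dec) (d0 : Int) : (pvH dec f p v).getD d d0 = f p v d := by
  refine PySem.Dict.getD_of_mem_items _ ?_ ?_ d0
  · exact List.mem_map.2 ⟨d, hd, rfl⟩
  · show (((PySem.Set.ofList dec).map (fun d => (d, f p v d))).map (·.1)).Nodup
    have hid : ((fun x : Int × Int => x.1) ∘ fun d => (d, f p v d)) = id := rfl
    rw [List.map_map, hid, List.map_id]
    exact PySem.Set.nodup_ofList dec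

theorem pvG_getD {dec : List Int} {f} {p : Int × List Int} {v : Int}
    (hv : v ∈ PySem.Set.ofList p.2) (d0 : PySem.Dict Int Int) :
    (pvG dec f p).getD v d0 = pvH dec f p v := by
  refine PySem.Dict.getD_of_mem_items _ ?_ ?_ d0
  · exact List.mem_map.2 ⟨v, hv, rfl⟩
  · show (((PySem.Set.ofList p.2).map (fun v => (v, pvH dec f p v))).map (·.1)).Nodup
    have hid : ((fun x : Int × PySem.Dict Int Int => x.1) ∘ fun v => (v, pvH dec f p v)) = id := rfl
    rw [List.map_map, hid, List.map_id]
    exact PySem.Set.nodup_ofList p.2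

theorem pvTable_getD {dec : List Int} {ix : List (Int × List Int)} {f} {p : Int × List Int}
    (hg : pvGood ix) (hp : p ∈ ix) (d0 : PySem.Dict Int (PySem.Dict Int Int)) :
    (pvTable dec ix f).getD (pvKey p.1) d0 = pvG dec f p := by
  refine PySem.Dict.getD_of_mem_items _ ?_ ?_ d0
  · exact List.mem_map.2 ⟨p, hp, rfl⟩
  · show ((ix.map (fun p => (pvKey p.1, pvG dec f p))).map (·.1)).Nodup
    simpa [List.map_map] using pvKeys_nodup hg

theorem pvTable_congr {dec : List Int} {ix : List (Int × List Int)} {f g}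
    (h : ∀ p ∈ ix, ∀ v ∈ PySem.Set.ofList p.2, ∀ d ∈ PySem.Set.ofList dec, f p v d = g p v d) :
    pvTable dec ix f = pvTable dec ix g := by
  unfold pvTable pvG pvH
  apply PySem.Dict.ext
  show List.map _ ix = List.map _ ix
  refine List.map_congr_left (fun p hp => ?_)
  refine Prod.ext rfl (congrArg PySem.Dict.mk ?_)
  refine List.map_congr_left (fun v hv => ?_)
  refine Prod.ext rfl (congrArg PySem.Dict.mk ?_)
  refine List.map_congr_left (fun d hd => ?_)
  exact Prod.ext rfl (h p hp v hv d hd)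

-- the +=1 step of A's counting loop, as one function
def pvBump (sl : PySem.Dict String (PySem.Dict Int (PySem.Dict Int Int))) (k : String) (v d : Int) :
    PySem.Dict String (PySem.Dict Int (PySem.Dict Int Int)) :=
  let outer := sl.getD k PySem.Dict.empty
  let inner := outer.getD v PySem.Dict.empty
  sl.insert k (outer.insert v (inner.insert d (inner.getD d 0 + 1)))

theorem pvH_keys {dec : List Int} {f} {p : Int × List Int} {v : Int} :
    (pvH dec f p v).keys = PySem.Set.ofList dec := by
  show ((PySem.Set.ofList dec).map (fun d => (d, f p v d))).map (·.1) = _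
  have hid : ((fun x : Int × Int => x.1) ∘ fun d => (d, f p v d)) = id := rfl
  rw [List.map_map, hid, List.map_id]

theorem pvG_keys {dec : List Int} {f} {p : Int × List Int} :
    (pvG dec f p).keys = PySem.Set.ofList p.2 := by
  show ((PySem.Set.ofList p.2).map (fun v => (v, pvH dec f p v))).map (·.1) = _
  have hid : ((fun x : Int × PySem.Dict Int Int => x.1) ∘ fun v => (v, pvH dec f p v)) = id := rfl
  rw [List.map_map, hid, List.map_id]

theorem pvH_insert {dec : List Int} {f} {p : Int × List Int} {v d : Int} {w : Int}
    (hd : d ∈ PySem.Set.ofList dec) :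
    (pvH dec f p v).insert d w
      = pvH dec (fun q v' d' => if d' = d then w else f q v' d') p v := by
  apply PySem.Dict.ext
  rw [PySem.Dict.items_insert_of_contains _ _ (by
    rw [PySem.Dict.contains_iff_mem_keys, pvH_keys]; exact hd)]
  show List.map _ (List.map _ _) = _
  rw [List.map_map]
  refine List.map_congr_left (fun d' hd' => ?_)
  by_cases h : d' = d
  · simp [Function.comp, h]
  · simp [Function.comp, h]

theorem pvG_insert {dec : List Int} {f} {p : Int × List Int} {v : Int}
    {w : PySem.Dict Int Int} (hv : v ∈ PySem.Set.ofList p.2)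
    {g : Int × List Int → Int → Int → Int}
    (hw : w = pvH dec g p v)
    (hsame : ∀ v' ∈ PySem.Set.ofList p.2, v' ≠ v → pvH dec f p v' = pvH dec g p v') :
    (pvG dec f p).insert v w = pvG dec g p := by
  apply PySem.Dict.ext
  rw [PySem.Dict.items_insert_of_contains _ _ (by
    rw [PySem.Dict.contains_iff_mem_keys, pvG_keys]; exact hv)]
  show List.map _ (List.map _ _) = _
  rw [List.map_map]
  refine List.map_congr_left (fun v' hv' => ?_)
  by_cases h : v' = v
  · simp [Function.comp, h, hw]
  · simp [Function.comp, h, hsame v' hv' h]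

theorem pvBump_table {dec : List Int} {ix : List (Int × List Int)} {f} {i : Int} {col : List Int}
    {v d : Int} (hg : pvGood ix) (hp : (i, col) ∈ ix)
    (hv : v ∈ PySem.Set.ofList col) (hd : d ∈ PySem.Set.ofList dec) :
    pvBump (pvTable dec ix f) (pvKey i) v d
      = pvTable dec ix
          (fun q v' d' => if q.1 = i ∧ v' = v ∧ d' = d then f q v' d' + 1 else f q v' d') := by
  have hi0 : 0 ≤ i := hg.2 _ hp
  simp only [pvBump]
  rw [pvTable_getD hg hp]
  rw [pvG_getD (p := (i, col)) hv]
  rw [pvH_getD (p := (i, col)) hd]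
  apply PySem.Dict.ext
  rw [PySem.Dict.items_insert_of_contains _ _ (by
    rw [PySem.Dict.contains_iff_mem_keys]
    show pvKey i ∈ (ix.map (fun p => (pvKey p.1, pvG dec f p))).map (·.1)
    rw [List.map_map]
    exact List.mem_map.2 ⟨(i, col), hp, rfl⟩)]
  show List.map _ (List.map _ _) = List.map _ _
  rw [List.map_map]
  refine List.map_congr_left (fun p hpp => ?_)
  by_cases h : p.1 = i
  · have hpe : p = (i, col) := by
      have := List.inj_on_of_nodup_map hg.1 hpp hp
      exact this h
    subst hpe
    simp only [Function.comp, beq_self_eq_true, if_pos]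
    refine Prod.ext rfl ?_
    refine (pvG_insert hv ?_ ?_).trans rfl
    · rw [pvH_insert (f := f) hd]
      unfold pvH
      refine congrArg PySem.Dict.mk (List.map_congr_left (fun d' hd' => ?_))
      by_cases h2 : d' = d <;> simp [h2]
    · intro v' hv' hne
      unfold pvH
      refine congrArg PySem.Dict.mk (List.map_congr_left (fun d' hd' => ?_))
      simp [hne]
  · have hne : ¬ (pvKey p.1 == pvKey i) = true := by
      simp only [beq_iff_eq]
      intro heq
      exact h (pvKey_inj (hg.2 _ hpp) hi0 heq)
    simp only [Function.comp, if_neg hne]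
    refine Prod.ext rfl ?_
    unfold pvG pvH
    refine congrArg PySem.Dict.mk (List.map_congr_left (fun v' hv' => ?_))
    refine Prod.ext rfl (congrArg PySem.Dict.mk (List.map_congr_left (fun d' hd' => ?_)))
    simp [h]

theorem pvEnum_bounds {α : Type} {xs : List α} {s : Int} :
    ∀ r ∈ PySem.List.enumerate xs s, s ≤ r.1 ∧ r.1 < s + xs.length := by
  induction xs generalizing s with
  | nil => simp [PySem.List.enumerate]
  | cons x xs ih =>
    intro r hr
    rw [PySem.List.enumerate_cons] at hr
    rcases List.mem_cons.1 hr with hr | hr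
    · subst hr
      simp only [List.length_cons]
      push_cast
      constructor <;> omega
    · have := ih r hr
      simp only [List.length_cons]
      push_cast
      omega

def pvCntE (dec col : List Int) (v d : Int) : Int :=
  ((PySem.List.enumerate dec).countP
    (fun r => r.2 == d && (PySem.List.pyGetD col r.1 0 == v)) : Int)

theorem pvLoop3 {dec : List Int} {ix : List (Int × List Int)} {i : Int} {col : List Int} {d : Int}
    (hg : pvGood ix) (hp : (i, col) ∈ ix) (hd : d ∈ PySem.Set.ofList dec)
    (L : List (Int × Int)) (hL : ∀ r ∈ L, PySem.List.pyGetD col r.1 0 ∈ PySem.Set.ofList col)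
    (f : Int × List Int → Int → Int → Int) :
    L.foldl (fun sl r =>
        if r.2 == d then pvBump sl (pvKey i) (PySem.List.pyGetD col r.1 0) d else sl)
      (pvTable dec ix f)
    = pvTable dec ix (fun q v' d' => f q v' d' +
        if q.1 = i ∧ d' = d then
          (L.countP (fun r => r.2 == d && (PySem.List.pyGetD col r.1 0 == v')) : Int)
        else 0) := by
  induction L generalizing f with
  | nil =>
    simp only [List.foldl_nil]
    refine (pvTable_congr (fun p hp' v hv d' hd' => ?_)).symm
    simp
  | cons r L ih =>
    simp only [List.foldl_cons]
    by_cases hr : (r.2 == d) = true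
    · rw [if_pos hr]
      rw [pvBump_table hg hp (hL r (List.mem_cons_self)) hd]
      rw [ih (fun r' hr' => hL r' (List.mem_cons_of_mem _ hr')) _]
      refine pvTable_congr (fun p hp' v hv d' hd' => ?_)
      simp only [List.countP_cons, hr, Bool.true_and]
      by_cases h1 : p.1 = i ∧ d' = d
      · obtain ⟨e1, e2⟩ := h1
        by_cases h2 : (PySem.List.pyGetD col r.1 0 == v) = true
        · have hv' : PySem.List.pyGetD col r.1 0 = v := by simpa using h2
          rw [if_pos ⟨e1, hv'.symm, e2⟩, if_pos ⟨e1, e2⟩, if_pos ⟨e1, e2⟩]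
          simp [h2]
          ring
        · have hne : ¬(p.1 = i ∧ v = PySem.List.pyGetD col r.1 0 ∧ d' = d) := by
            rintro ⟨_, rfl, _⟩
            simp at h2
          rw [if_neg hne, if_pos ⟨e1, e2⟩, if_pos ⟨e1, e2⟩]
          simp [h2]
      · have hne : ¬(p.1 = i ∧ v = PySem.List.pyGetD col r.1 0 ∧ d' = d) := by
          rintro ⟨e1, _, e2⟩
          exact h1 ⟨e1, e2⟩
        rw [if_neg hne, if_neg h1, if_neg h1]
    · rw [if_neg hr]
      rw [ih (fun r' hr' => hL r' (List.mem_cons_of_mem _ hr')) f]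
      refine pvTable_congr (fun p hp' v hv d' hd' => ?_)
      simp only [List.countP_cons]
      simp [Bool.eq_false_iff.2 hr]

theorem pvLoop2 {dec : List Int} {ix : List (Int × List Int)} {d : Int}
    (hg : pvGood ix) (hd : d ∈ PySem.Set.ofList dec)
    (hlen : ∀ p ∈ ix, dec.length ≤ p.2.length)
    (S : List (Int × List Int)) (hS : ∀ q ∈ S, q ∈ ix) (hSnd : (S.map (·.1)).Nodup)
    (f : Int × List Int → Int → Int → Int) :
    S.foldl (fun sl q => (PySem.List.enumerate dec).foldl
        (fun sl r =>
          if r.2 == d then pvBump sl (pvKey q.1) (PySem.List.pyGetD q.2 r.1 0) d else sl) sl)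
      (pvTable dec ix f)
    = pvTable dec ix (fun p v' d' => f p v' d' +
        if p.1 ∈ S.map (·.1) ∧ d' = d then pvCntE dec p.2 v' d else 0) := by
  induction S generalizing f with
  | nil =>
    simp only [List.foldl_nil]
    refine (pvTable_congr (fun p hp' v hv d' hd' => ?_)).symm
    simp
  | cons q S ih =>
    have hq : q ∈ ix := hS q List.mem_cons_self
    have hq' : (q.1, q.2) ∈ ix := by simpa using hq
    simp only [List.foldl_cons]
    rw [pvLoop3 hg hq' hd (PySem.List.enumerate dec) (fun r hr => ?side) f]
    case side =>
      have hb := pvEnum_bounds r hr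
      have hlq := hlen q hq
      rw [PySem.Set.mem_ofList]
      rw [PySem.List.pyGetD_eq_getElem q.2 0 (by omega) (by omega)]
      exact List.getElem_mem _
    rw [ih (fun p hp' => hS p (List.mem_cons_of_mem _ hp')) (List.Nodup.of_cons hSnd) _]
    refine pvTable_congr (fun p hp' v hv d' hd' => ?_)
    simp only [List.map_cons, List.mem_cons]
    by_cases h1 : p.1 = q.1
    · have hpe : p = q := List.inj_on_of_nodup_map hg.1 hp' hq h1
      subst hpe
      have hns : p.1 ∉ S.map (·.1) := by
        have h' : (p.1 :: S.map (·.1)).Nodup := by simpa using hSnd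
        exact (List.nodup_cons.1 h').1
      by_cases h2 : d' = d
      · rw [if_pos ⟨h1, h2⟩, if_neg (by tauto), if_pos ⟨Or.inl h1, h2⟩]
        unfold pvCntE
        ring
      · rw [if_neg (by tauto), if_neg (by tauto), if_neg (by tauto)]
        ring
    · by_cases h3 : p.1 ∈ S.map (·.1) ∧ d' = d
      · rw [if_neg (by tauto), if_pos h3, if_pos ⟨Or.inr h3.1, h3.2⟩]
        ring
      · rw [if_neg (by tauto), if_neg h3, if_neg (by tauto)]
        ring

theorem pvLoop1 {dec : List Int} {ix : List (Int × List Int)}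
    (hg : pvGood ix) (hlen : ∀ p ∈ ix, dec.length ≤ p.2.length)
    (D : List Int) (hD : ∀ d ∈ D, d ∈ PySem.Set.ofList dec) (hDnd : D.Nodup)
    (f : Int × List Int → Int → Int → Int) :
    D.foldl (fun sl d => ix.foldl (fun sl q => (PySem.List.enumerate dec).foldl
        (fun sl r =>
          if r.2 == d then pvBump sl (pvKey q.1) (PySem.List.pyGetD q.2 r.1 0) d else sl) sl) sl)
      (pvTable dec ix f)
    = pvTable dec ix (fun p v' d' => f p v' d' +
        if d' ∈ D then pvCntE dec p.2 v' d' else 0) := by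
  induction D generalizing f with
  | nil =>
    simp only [List.foldl_nil]
    refine (pvTable_congr (fun p hp' v hv d' hd' => ?_)).symm
    simp
  | cons d D ih =>
    simp only [List.foldl_cons]
    rw [pvLoop2 hg (hD d List.mem_cons_self) hlen ix (fun q hq => hq) hg.1 f]
    rw [ih (fun d' hd' => hD d' (List.mem_cons_of_mem _ hd')) (List.Nodup.of_cons hDnd) _]
    refine pvTable_congr (fun p hp' v hv d' hd' => ?_)
    have hpm : p.1 ∈ ix.map (·.1) := List.mem_map.2 ⟨p, hp', rfl⟩
    simp only [List.mem_cons]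
    by_cases h1 : d' = d
    · subst h1
      have hnd' : d' ∉ D := (List.nodup_cons.1 hDnd).1
      rw [if_pos ⟨hpm, rfl⟩, if_neg (by tauto), if_pos (Or.inl rfl)]
      ring
    · by_cases h2 : d' ∈ D
      · rw [if_neg (by tauto), if_pos h2, if_pos (Or.inr h2)]
        ring
      · rw [if_neg (by tauto), if_neg h2, if_neg (by tauto)]
        ring

theorem pvGetD_zero_fold (l : List Int) (dd : PySem.Dict Int Int) (v : Int)
    (h : dd.getD v 0 = 0) : (l.foldl (fun dd j => dd.insert j 0) dd).getD v 0 = 0 := by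
  induction l generalizing dd with
  | nil => simpa using h
  | cons j l ih =>
    simp only [List.foldl_cons]
    refine ih _ ?_
    rw [PySem.Dict.getD_insert]
    split <;> simp [h]

theorem pvZrow_eq {dec : List Int} {p : Int × List Int} {v : Int} :
    dec.foldl (fun dd j => dd.insert j 0) PySem.Dict.empty
      = pvH dec (fun _ _ _ => 0) p v := by
  apply PySem.Dict.ext
  have hkeys : (dec.foldl (fun dd j => dd.insert j 0) (PySem.Dict.empty : PySem.Dict Int Int)).keys
      = PySem.Set.ofList dec := by
    rw [PySem.Dict.keys_foldl_insert dec (fun _ _ => (0 : Int)) PySem.Dict.empty]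
    rfl
  have hnd : (dec.foldl (fun dd j => dd.insert j 0) (PySem.Dict.empty : PySem.Dict Int Int)).keys.Nodup := by
    rw [hkeys]; exact PySem.Set.nodup_ofList dec
  have hitems := PySem.Dict.items_eq_map_keys _ hnd 0
  rw [hitems, hkeys]
  show _ = List.map _ (PySem.Set.ofList dec)
  refine List.map_congr_left (fun j hj => ?_)
  rw [pvGetD_zero_fold dec PySem.Dict.empty j (by simp)]

theorem pvPhase1 {dec : List Int} {ix : List (Int × List Int)} (hg : pvGood ix) :
    ix.foldl (fun sl p => sl.insert (pvKey p.1)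
        ((PySem.Set.ofList p.2).foldl (fun e i =>
            e.insert i (dec.foldl (fun dd j => dd.insert j 0) PySem.Dict.empty))
          PySem.Dict.empty))
      PySem.Dict.empty
    = pvTable dec ix (fun _ _ _ => 0) := by
  apply PySem.Dict.ext
  have hfresh := PySem.Dict.items_foldl_insert_fresh ix (fun p => pvKey p.1)
      (fun p => (PySem.Set.ofList p.2).foldl (fun e i =>
          e.insert i (dec.foldl (fun dd j => dd.insert j (0 : Int)) PySem.Dict.empty))
        PySem.Dict.empty)
      PySem.Dict.empty (fun a _ => PySem.Dict.contains_empty _) (pvKeys_nodup hg)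
  beta_reduce at hfresh
  rw [hfresh]
  rw [show (PySem.Dict.empty : PySem.Dict String (PySem.Dict Int (PySem.Dict Int Int))).items = [] from rfl,
    List.nil_append]
  refine List.map_congr_left (fun p hp => ?_)
  refine Prod.ext rfl ?_
  show _ = pvG dec (fun _ _ _ => 0) p
  apply PySem.Dict.ext
  have hfresh2 := PySem.Dict.items_foldl_insert_fresh (PySem.Set.ofList p.2) (fun v => v)
      (fun _ => dec.foldl (fun dd j => dd.insert j (0 : Int)) PySem.Dict.empty)
      PySem.Dict.empty (fun a _ => PySem.Dict.contains_empty _)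
      (by simp)
  beta_reduce at hfresh2
  rw [hfresh2]
  rw [show (PySem.Dict.empty : PySem.Dict Int (PySem.Dict Int Int)).items = [] from rfl,
    List.nil_append]
  exact List.map_congr_left (fun v hv => Prod.ext rfl (pvZrow_eq (p := p) (v := v)))

theorem pvTable_keys {dec : List Int} {ix : List (Int × List Int)} {f} :
    (pvTable dec ix f).keys = ix.map (fun p => pvKey p.1) := by
  show (ix.map (fun p => (pvKey p.1, pvG dec f p))).map (·.1) = _
  rw [List.map_map]
  rfl

theorem pvBezInner {dec : List Int} {f} {p : Int × List Int} {v : Int} :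
    (pvH dec f p v).keys.foldl (fun acc2 j =>
        if (pvH dec f p v).getD j 0 != 0 then acc2.insert j ((pvH dec f p v).getD j 0) else acc2)
      PySem.Dict.empty
    = PySem.Dict.mk (((PySem.Set.ofList dec).filter (fun d => f p v d != 0)).map
        (fun d => (d, f p v d))) := by
  rw [pvH_keys]
  rw [PySem.List.foldl_congr_mem _ _ (fun acc2 j =>
      if f p v j != 0 then acc2.insert j (f p v j) else acc2) _
    (fun acc2 j hj => by rw [pvH_getD hj])]
  have hif := PySem.List.foldl_if_eq_foldl_filter (p := fun j => f p v j != 0)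
    (f := fun (acc2 : PySem.Dict Int Int) (j : Int) => acc2.insert j (f p v j))
    (l := PySem.Set.ofList dec) (init := PySem.Dict.empty)
  rw [hif]
  apply PySem.Dict.ext
  have hfr := PySem.Dict.items_foldl_insert_fresh ((PySem.Set.ofList dec).filter (fun d => f p v d != 0))
    (fun j => j) (fun j => f p v j) PySem.Dict.empty
    (fun a _ => PySem.Dict.contains_empty _)
    (by simpa using List.Nodup.filter _ (PySem.Set.nodup_ofList dec))
  beta_reduce at hfr
  rw [hfr]
  rw [show (PySem.Dict.empty : PySem.Dict Int Int).items = [] from rfl, List.nil_append]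

theorem pvBezMid {dec : List Int} {f} {p : Int × List Int} :
    (pvG dec f p).keys.foldl (fun acc i =>
        acc.insert i
          (((pvG dec f p).getD i PySem.Dict.empty).keys.foldl (fun acc2 j =>
            if ((pvG dec f p).getD i PySem.Dict.empty).getD j 0 != 0 then
              acc2.insert j (((pvG dec f p).getD i PySem.Dict.empty).getD j 0)
            else acc2)
            PySem.Dict.empty))
      PySem.Dict.empty
    = PySem.Dict.mk ((PySem.Set.ofList p.2).map (fun v =>
        (v, PySem.Dict.mk (((PySem.Set.ofList dec).filter (fun d => f p v d != 0)).map
              (fun d => (d, f p v d)))))) := by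
  rw [pvG_keys]
  rw [PySem.List.foldl_congr_mem _ _ (fun acc v =>
      acc.insert v (PySem.Dict.mk (((PySem.Set.ofList dec).filter (fun d => f p v d != 0)).map
        (fun d => (d, f p v d))))) _
    (fun acc v hv => by rw [pvG_getD hv, pvBezInner])]
  apply PySem.Dict.ext
  have hfr := PySem.Dict.items_foldl_insert_fresh (PySem.Set.ofList p.2)
    (fun v => v)
    (fun v => PySem.Dict.mk (((PySem.Set.ofList dec).filter (fun d => f p v d != 0)).map
        (fun d => (d, f p v d))))
    PySem.Dict.empty
    (fun a _ => PySem.Dict.contains_empty _)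
    (by simp)
  beta_reduce at hfr
  rw [hfr]
  rw [show (PySem.Dict.empty : PySem.Dict Int (PySem.Dict Int Int)).items = [] from rfl,
    List.nil_append]

theorem pvBezZer {dec : List Int} {ix : List (Int × List Int)} {f} (hg : pvGood ix) :
    bez_zer (pvTable dec ix f)
      = PySem.Dict.mk (ix.map (fun p =>
          (pvKey p.1, PySem.Dict.mk ((PySem.Set.ofList p.2).map (fun v =>
            (v, PySem.Dict.mk (((PySem.Set.ofList dec).filter (fun d => f p v d != 0)).map
                  (fun d => (d, f p v d))))))))) := by
  simp only [bez_zer]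
  rw [pvTable_keys]
  rw [List.foldl_map]
  rw [PySem.List.foldl_congr_mem _ _ (fun nowy p =>
      nowy.insert (pvKey p.1) (PySem.Dict.mk ((PySem.Set.ofList p.2).map (fun v =>
        (v, PySem.Dict.mk (((PySem.Set.ofList dec).filter (fun d => f p v d != 0)).map
              (fun d => (d, f p v d)))))))) _
    (fun nowy p hp => by rw [pvTable_getD hg hp, pvBezMid])]
  apply PySem.Dict.ext
  have hfr := PySem.Dict.items_foldl_insert_fresh ix
    (fun p => pvKey p.1)
    (fun p => PySem.Dict.mk ((PySem.Set.ofList p.2).map (fun v =>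
        (v, PySem.Dict.mk (((PySem.Set.ofList dec).filter (fun d => f p v d != 0)).map
              (fun d => (d, f p v d)))))))
    PySem.Dict.empty
    (fun a _ => PySem.Dict.contains_empty _)
    (pvKeys_nodup hg)
  beta_reduce at hfr
  rw [hfr]
  rw [show (PySem.Dict.empty : PySem.Dict String (PySem.Dict Int (PySem.Dict Int Int))).items = [] from rfl,
    List.nil_append]

theorem pvCnt_aux (col : List Int) (v d : Int) :
    ∀ (dec : List Int) (s : Nat), s + dec.length ≤ col.length →
    ((PySem.List.enumerate dec (s : Int)).countP
        (fun r => r.2 == d && (PySem.List.pyGetD col r.1 0 == v)))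
      = ((col.drop s).zip dec).count (v, d) := by
  intro dec
  induction dec with
  | nil => intro s h; simp [PySem.List.enumerate]
  | cons e t ih =>
    intro s h
    simp only [List.length_cons] at h
    have hs : s < col.length := by omega
    rw [PySem.List.enumerate_cons, List.drop_eq_getElem_cons hs]
    rw [List.zip_cons_cons, List.countP_cons, List.count_cons]
    have hget : PySem.List.pyGetD col (s : Int) 0 = col[s] :=
      PySem.List.pyGetD_eq_getElem col 0 (by omega) (by omega)
    have hcast : ((s : Int) + 1) = ((s + 1 : Nat) : Int) := by push_cast; ring
    rw [hcast, ih (s + 1) (by omega)]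
    simp only [hget]
    have hbeq : (((col[s], e) : Int × Int) == (v, d)) = (col[s] == v && e == d) := rfl
    rw [hbeq]
    rw [Bool.and_comm]

theorem pvCntE_eq {dec col : List Int} (h : dec.length ≤ col.length) (v d : Int) :
    pvCntE dec col v d = ((col.zip dec).count (v, d) : Int) := by
  unfold pvCntE
  have := pvCnt_aux col v d dec 0 (by omega)
  rw [show ((0 : Nat) : Int) = 0 from rfl] at this
  rw [this, List.drop_zero]

-- under Pre_, the pairs B counts — (kolumna[i], dec[i]) for i over enumerate(dec) — are zip kolumna dec
theorem pvEnumMap (col : List Int) :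
    ∀ (dec : List Int) (s : Nat), s + dec.length ≤ col.length →
    (PySem.List.enumerate dec (s : Int)).map (fun r => (PySem.List.pyGetD col r.1 0, r.2))
      = (col.drop s).zip dec := by
  intro dec
  induction dec with
  | nil => intro s h; simp [PySem.List.enumerate]
  | cons e t ih =>
    intro s h
    simp only [List.length_cons] at h
    have hs : s < col.length := by omega
    rw [PySem.List.enumerate_cons, List.drop_eq_getElem_cons hs, List.zip_cons_cons, List.map_cons]
    have hget : PySem.List.pyGetD col (s : Int) 0 = col[s] :=
      PySem.List.pyGetD_eq_getElem col 0 (by omega) (by omega)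
    have hcast : ((s : Int) + 1) = ((s + 1 : Nat) : Int) := by push_cast; ring
    rw [hget, hcast, ih (s + 1) (by omega)]

theorem pvAltCounter {dec col : List Int} (h : dec.length ≤ col.length) :
    (PySem.List.enumerate dec).foldl (fun pr r =>
        pr.insert (PySem.List.pyGetD col r.1 0, r.2)
          (pr.getD (PySem.List.pyGetD col r.1 0, r.2) 0 + 1)) PySem.Dict.empty
      = PySem.Dict.counter (col.zip dec) := by
  have hmap := pvEnumMap col dec 0 (by omega)
  rw [show ((0 : Nat) : Int) = 0 from rfl, List.drop_zero] at hmap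
  calc (PySem.List.enumerate dec).foldl (fun pr r =>
        pr.insert (PySem.List.pyGetD col r.1 0, r.2)
          (pr.getD (PySem.List.pyGetD col r.1 0, r.2) 0 + 1))
        (PySem.Dict.empty : PySem.Dict (Int × Int) Int)
      = ((PySem.List.enumerate dec).map (fun r => (PySem.List.pyGetD col r.1 0, r.2))).foldl
          (fun pr vd => pr.insert vd (pr.getD vd 0 + 1))
          (PySem.Dict.empty : PySem.Dict (Int × Int) Int) := by
        rw [List.foldl_map]
    _ = (col.zip dec).foldl (fun pr vd => pr.insert vd (pr.getD vd 0 + 1))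
          (PySem.Dict.empty : PySem.Dict (Int × Int) Int) := by
        rw [hmap]
    _ = PySem.Dict.counter (col.zip dec) :=
        PySem.Dict.foldl_insert_getD_add_one_eq_counter _

theorem pvAltTable {dec : List Int} {ix : List (Int × List Int)} (hg : pvGood ix) :
    ix.foldl (fun w p =>
        w.insert (pvKey p.1)
          ((PySem.Set.ofList p.2).foldl (fun m v =>
              m.insert v
                ((PySem.Set.ofList dec).foldl (fun dd d =>
                    if (PySem.Dict.counter (p.2.zip dec)).contains (v, d) then
                      dd.insert d ((PySem.Dict.counter (p.2.zip dec)).getD (v, d) 0)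
                    else dd)
                  PySem.Dict.empty))
            PySem.Dict.empty))
      PySem.Dict.empty
    = PySem.Dict.mk (ix.map (fun p =>
        (pvKey p.1, PySem.Dict.mk ((PySem.Set.ofList p.2).map (fun v =>
          (v, PySem.Dict.mk (((PySem.Set.ofList dec).filter (fun d => (p.2.zip dec).contains (v, d))).map
                (fun d => (d, ((p.2.zip dec).count (v, d) : Int)))))))))) := by
  have hinner : ∀ (p : Int × List Int) (v : Int),
      (PySem.Set.ofList dec).foldl (fun dd d =>
          if (PySem.Dict.counter (p.2.zip dec)).contains (v, d) then
            dd.insert d ((PySem.Dict.counter (p.2.zip dec)).getD (v, d) 0)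
          else dd)
        PySem.Dict.empty
      = PySem.Dict.mk (((PySem.Set.ofList dec).filter (fun d => (p.2.zip dec).contains (v, d))).map
          (fun d => (d, ((p.2.zip dec).count (v, d) : Int)))) := by
    intro p v
    rw [PySem.List.foldl_congr_mem _ _ (fun dd d =>
        if (p.2.zip dec).contains (v, d) then
          dd.insert d (((p.2.zip dec).count (v, d) : Int))
        else dd) _
      (fun dd d hd => by
        rw [PySem.Dict.contains_counter, PySem.Dict.getD_counter])]
    have hif := PySem.List.foldl_if_eq_foldl_filter (p := fun d => (p.2.zip dec).contains (v, d))
      (f := fun (dd : PySem.Dict Int Int) (d : Int) => dd.insert d (((p.2.zip dec).count (v, d) : Int)))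
      (l := PySem.Set.ofList dec) (init := PySem.Dict.empty)
    rw [hif]
    apply PySem.Dict.ext
    have hfr := PySem.Dict.items_foldl_insert_fresh
      ((PySem.Set.ofList dec).filter (fun d => (p.2.zip dec).contains (v, d)))
      (fun d => d) (fun d => ((p.2.zip dec).count (v, d) : Int)) PySem.Dict.empty
      (fun a _ => PySem.Dict.contains_empty _)
      (by simpa using List.Nodup.filter _ (PySem.Set.nodup_ofList dec))
    beta_reduce at hfr
    rw [hfr]
    rw [show (PySem.Dict.empty : PySem.Dict Int Int).items = [] from rfl, List.nil_append]
  have hmid : ∀ (p : Int × List Int),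
      (PySem.Set.ofList p.2).foldl (fun m v =>
          m.insert v
            ((PySem.Set.ofList dec).foldl (fun dd d =>
                if (PySem.Dict.counter (p.2.zip dec)).contains (v, d) then
                  dd.insert d ((PySem.Dict.counter (p.2.zip dec)).getD (v, d) 0)
                else dd)
              PySem.Dict.empty))
        PySem.Dict.empty
      = PySem.Dict.mk ((PySem.Set.ofList p.2).map (fun v =>
          (v, PySem.Dict.mk (((PySem.Set.ofList dec).filter (fun d => (p.2.zip dec).contains (v, d))).map
                (fun d => (d, ((p.2.zip dec).count (v, d) : Int))))))) := by
    intro p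
    rw [PySem.List.foldl_congr_mem _ _ (fun m v =>
        m.insert v (PySem.Dict.mk (((PySem.Set.ofList dec).filter (fun d => (p.2.zip dec).contains (v, d))).map
          (fun d => (d, ((p.2.zip dec).count (v, d) : Int)))))) _
      (fun m v hv => by rw [hinner p v])]
    apply PySem.Dict.ext
    have hfr := PySem.Dict.items_foldl_insert_fresh (PySem.Set.ofList p.2)
      (fun v => v)
      (fun v => PySem.Dict.mk (((PySem.Set.ofList dec).filter (fun d => (p.2.zip dec).contains (v, d))).map
          (fun d => (d, ((p.2.zip dec).count (v, d) : Int)))))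
      PySem.Dict.empty
      (fun a _ => PySem.Dict.contains_empty _)
      (by simp)
    beta_reduce at hfr
    rw [hfr]
    rw [show (PySem.Dict.empty : PySem.Dict Int (PySem.Dict Int Int)).items = [] from rfl,
      List.nil_append]
  rw [PySem.List.foldl_congr_mem _ _ (fun w p =>
      w.insert (pvKey p.1) (PySem.Dict.mk ((PySem.Set.ofList p.2).map (fun v =>
        (v, PySem.Dict.mk (((PySem.Set.ofList dec).filter (fun d => (p.2.zip dec).contains (v, d))).map
              (fun d => (d, ((p.2.zip dec).count (v, d) : Int))))))))) _
    (fun w p hp => by rw [hmid p])]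
  apply PySem.Dict.ext
  have hfr := PySem.Dict.items_foldl_insert_fresh ix
    (fun p => pvKey p.1)
    (fun p => PySem.Dict.mk ((PySem.Set.ofList p.2).map (fun v =>
        (v, PySem.Dict.mk (((PySem.Set.ofList dec).filter (fun d => (p.2.zip dec).contains (v, d))).map
              (fun d => (d, ((p.2.zip dec).count (v, d) : Int))))))))
    PySem.Dict.empty
    (fun a _ => PySem.Dict.contains_empty _)
    (pvKeys_nodup hg)
  beta_reduce at hfr
  rw [hfr]
  rw [show (PySem.Dict.empty : PySem.Dict String (PySem.Dict Int (PySem.Dict Int Int))).items = [] from rfl,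
    List.nil_append]

theorem pvGetNeg1 {α : Type} {xs : List α} (h : xs ≠ []) :
    PySem.List.pyGet? xs (-1) = xs.getLast? := by
  have hlen : 1 ≤ xs.length := List.length_pos_of_ne_nil h
  unfold PySem.List.pyGet? PySem.List.pyIdx?
  rw [if_neg (by omega), if_pos (by omega)]
  simp only [Option.bind_some]
  rw [List.getLast?_eq_getElem?]
  rfl

theorem pvSliceA {α : Type} {xs : List α} (h : xs ≠ []) :
    PySem.List.slice xs none (some ((xs.length : Int) - 1)) = xs.dropLast := by
  have hlen : 1 ≤ xs.length := List.length_pos_of_ne_nil h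
  have hcast : (xs.length : Int) - 1 = ((xs.length - 1 : Nat) : Int) := by omega
  rw [hcast, PySem.List.slice_to_natCast, List.dropLast_eq_take]

theorem pvGood_enum (cls : List (List Int)) : pvGood (PySem.List.enumerate cls) := by
  constructor
  · rw [show ((PySem.List.enumerate cls).map (·.1)) = (PySem.List.enumerate cls 0).map (fun x => x.1) from rfl]
    rw [PySem.List.map_fst_enumerate cls 0, zero_add]
    rw [PySem.List.pyRange_zero_natCast]
    exact List.nodup_range.map (fun a b => by omega)
  · intro p hp
    exact (pvEnum_bounds p hp).1

theorem pvMain (dec : List Int) (cls : List (List Int))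
    (hlen : ∀ col ∈ cls, dec.length ≤ col.length) :
    (bez_zer
      ((PySem.Set.ofList dec).foldl (fun sl d =>
          (PySem.List.enumerate cls).foldl (fun sl q =>
            (PySem.List.enumerate dec).foldl (fun sl r =>
              if r.2 == d then pvBump sl (pvKey q.1) (PySem.List.pyGetD q.2 r.1 0) d else sl) sl) sl)
        ((PySem.List.enumerate cls).foldl (fun p_1 p =>
            p_1.insert (pvKey p.1)
              ((PySem.Set.ofList p.2).foldl (fun e i =>
                  e.insert i (dec.foldl (fun dd j => dd.insert j 0) PySem.Dict.empty))
                PySem.Dict.empty))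
          PySem.Dict.empty))).items.map (fun p => (p.1, p.2.items.map (fun q => (q.1, q.2.items))))
    = ((PySem.List.enumerate cls).foldl (fun w p =>
          w.insert (pvKey p.1)
            ((PySem.Set.ofList p.2).foldl (fun m v =>
                m.insert v
                  ((PySem.Set.ofList dec).foldl (fun dd d =>
                      if (((PySem.List.enumerate dec).foldl (fun pr r =>
                            pr.insert (PySem.List.pyGetD p.2 r.1 0, r.2)
                              (pr.getD (PySem.List.pyGetD p.2 r.1 0, r.2) 0 + 1))
                            PySem.Dict.empty : PySem.Dict (Int × Int) Int)).contains (v, d) then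
                        dd.insert d (((PySem.List.enumerate dec).foldl (fun pr r =>
                            pr.insert (PySem.List.pyGetD p.2 r.1 0, r.2)
                              (pr.getD (PySem.List.pyGetD p.2 r.1 0, r.2) 0 + 1))
                            PySem.Dict.empty).getD (v, d) 0)
                      else dd)
                    PySem.Dict.empty))
              PySem.Dict.empty))
        PySem.Dict.empty).items.map (fun p => (p.1, p.2.items.map (fun q => (q.1, q.2.items)))) := by
  have hg := pvGood_enum cls
  have hlen' : ∀ p ∈ PySem.List.enumerate cls, dec.length ≤ p.2.length := by
    intro p hp
    have hm : p.2 ∈ List.map (fun x => x.2) (PySem.List.enumerate cls 0) :=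
      List.mem_map.2 ⟨p, hp, rfl⟩
    rw [PySem.List.map_snd_enumerate cls 0] at hm
    exact hlen p.2 hm
  have hA : (PySem.Set.ofList dec).foldl (fun sl d =>
          (PySem.List.enumerate cls).foldl (fun sl q =>
            (PySem.List.enumerate dec).foldl (fun sl r =>
              if r.2 == d then pvBump sl (pvKey q.1) (PySem.List.pyGetD q.2 r.1 0) d else sl) sl) sl)
        ((PySem.List.enumerate cls).foldl (fun p_1 p =>
            p_1.insert (pvKey p.1)
              ((PySem.Set.ofList p.2).foldl (fun e i =>
                  e.insert i (dec.foldl (fun dd j => dd.insert j 0) PySem.Dict.empty))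
                PySem.Dict.empty))
          PySem.Dict.empty)
      = pvTable dec (PySem.List.enumerate cls)
          (fun p v d => ((p.2.zip dec).count (v, d) : Int)) := by
    rw [pvPhase1 hg]
    rw [pvLoop1 hg hlen' (PySem.Set.ofList dec) (fun d hd => hd) (PySem.Set.nodup_ofList dec)
      (fun _ _ _ => 0)]
    refine pvTable_congr (fun p hp v hv d hd => ?_)
    simp only [if_pos hd]
    rw [pvCntE_eq (hlen' p hp) v d]
    ring
  rw [hA, pvBezZer hg]
  have hB : (PySem.List.enumerate cls).foldl (fun w p =>
          w.insert (pvKey p.1)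
            ((PySem.Set.ofList p.2).foldl (fun m v =>
                m.insert v
                  ((PySem.Set.ofList dec).foldl (fun dd d =>
                      if (((PySem.List.enumerate dec).foldl (fun pr r =>
                            pr.insert (PySem.List.pyGetD p.2 r.1 0, r.2)
                              (pr.getD (PySem.List.pyGetD p.2 r.1 0, r.2) 0 + 1))
                            PySem.Dict.empty : PySem.Dict (Int × Int) Int)).contains (v, d) then
                        dd.insert d (((PySem.List.enumerate dec).foldl (fun pr r =>
                            pr.insert (PySem.List.pyGetD p.2 r.1 0, r.2)
                              (pr.getD (PySem.List.pyGetD p.2 r.1 0, r.2) 0 + 1))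
                            PySem.Dict.empty).getD (v, d) 0)
                      else dd)
                    PySem.Dict.empty))
              PySem.Dict.empty))
        PySem.Dict.empty
      = PySem.Dict.mk ((PySem.List.enumerate cls).map (fun p =>
          (pvKey p.1, PySem.Dict.mk ((PySem.Set.ofList p.2).map (fun v =>
            (v, PySem.Dict.mk (((PySem.Set.ofList dec).filter (fun d => (p.2.zip dec).contains (v, d))).map
                  (fun d => (d, ((p.2.zip dec).count (v, d) : Int)))))))))) := by
    rw [PySem.List.foldl_congr_mem _ _ (fun w p =>
        w.insert (pvKey p.1)
          ((PySem.Set.ofList p.2).foldl (fun m v =>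
              m.insert v
                ((PySem.Set.ofList dec).foldl (fun dd d =>
                    if (PySem.Dict.counter (p.2.zip dec)).contains (v, d) then
                      dd.insert d ((PySem.Dict.counter (p.2.zip dec)).getD (v, d) 0)
                    else dd)
                  PySem.Dict.empty))
            PySem.Dict.empty)) _
      (fun w p hp => by rw [pvAltCounter (hlen' p hp)])]
    exact pvAltTable hg
  rw [hB]
  refine congrArg (List.map _) (congrArg PySem.Dict.items (congrArg PySem.Dict.mk ?_))
  refine List.map_congr_left (fun p hp => ?_)
  refine Prod.ext rfl (congrArg PySem.Dict.mk (List.map_congr_left (fun v hv => ?_)))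
  refine Prod.ext rfl (congrArg PySem.Dict.mk (congrArg _ ?_))
  refine List.filter_congr (fun d hd => ?_)
  by_cases hx : (v, d) ∈ p.2.zip dec
  · have hc : 0 < List.count ((v, d)) (p.2.zip dec) := List.count_pos_iff.2 hx
    simp [hx]
    omega
  · simp [hx, List.count_eq_zero.2 hx]

-- ===== VERDICT (by name: the statement is the Claim_ definition above) =====
theorem liczba_wystapien_decyzyjnych_spec : Claim_equal_liczba_wystapien_decyzyjnych := by
  intro tab _ hpre
  unfold Spec_liczba_wystapien_decyzyjnych
  obtain ⟨hne, hlen⟩ := hpre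
  simp only [liczba_wystapien_decyzyjnych, liczba_wystapien_decyzyjnych_alt]
  rw [pvGetNeg1 hne, pvSliceA hne, PySem.List.slice_to_neg_one]
  exact pvMain (tab.getLast?.getD []) tab.dropLast (fun col hc => by have := hlen col hc; omega)
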